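-- pv_equiv track=rewrite | github.com/ROYCOHEN01/Python-projects | ex67_313293136.py | create_sorted_binary_tree
-- ===== SOURCE A (Python) =====
-- def create_sorted_binary_tree(lst, tree=None, idx=0):
--     if len(lst) > 0 and tree is None:
--         tree = {}
--         tree[0] = lst[0]
--     if len(lst) == 0:
--         return tree
--     if idx in tree:
--         if lst[0] < tree[idx]:
--             return create_sorted_binary_tree(lst ,tree , idx * 2 + 1)
--         if lst[0] > tree[idx]:
--             return create_sorted_binary_tree(lst ,tree ,idx * 2 + 2)
--     else:
--         tree[idx] = lst[0]
--     return create_sorted_binary_tree(lst[1:] ,tree , 0)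
-- ===== SOURCE B (Python) =====
-- def create_sorted_binary_tree(lst, tree=None, idx=0):
--     if lst and tree is None:
--         tree = {0: lst[0]}
--     if not lst:
--         return tree
--     start = idx
--     for v in lst:
--         i = start
--         start = 0
--         while True:
--             if i not in tree:
--                 tree[i] = v
--                 break
--             w = tree[i]
--             if v < w:
--                 i = i * 2 + 1
--             elif v > w:
--                 i = i * 2 + 2
--             else:
--                 break
--     return tree
-- ===== Notes on version B (the rewrite author's own statement) =====
-- stated objective: faster
-- what changed: A's recursion that re-enters itself with a fresh lst[1:] copy per inserted element is replaced by a single iterative for-loop over the list with an inner index-walk of the tree dict, so no list slices and no recursion at all.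
-- outside the precondition, e.g. on create_sorted_binary_tree([5], {-1: 3}, -1): A returns {-1: 3, 0: 5}, B returns {-1: 3, 0: 5}; on create_sorted_binary_tree([0], {-1: 5}, -1): A raises RecursionError, B does not finish within the time limit
import Mathlib
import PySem

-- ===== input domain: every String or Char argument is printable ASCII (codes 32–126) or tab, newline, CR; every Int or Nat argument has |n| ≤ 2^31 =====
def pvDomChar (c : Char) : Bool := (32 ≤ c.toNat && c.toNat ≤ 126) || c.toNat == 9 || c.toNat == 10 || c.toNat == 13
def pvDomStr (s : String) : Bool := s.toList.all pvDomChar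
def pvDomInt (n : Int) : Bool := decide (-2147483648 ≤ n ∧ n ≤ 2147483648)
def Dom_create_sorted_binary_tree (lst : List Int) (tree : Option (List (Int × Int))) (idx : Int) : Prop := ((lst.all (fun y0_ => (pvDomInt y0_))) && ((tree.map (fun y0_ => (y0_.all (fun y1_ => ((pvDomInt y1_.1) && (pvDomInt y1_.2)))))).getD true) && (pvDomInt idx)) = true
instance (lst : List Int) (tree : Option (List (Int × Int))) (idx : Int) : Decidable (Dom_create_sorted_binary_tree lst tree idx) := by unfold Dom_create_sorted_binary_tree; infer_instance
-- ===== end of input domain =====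

-- B replaces A's recursion-with-list-slicing by a single iterative pass over the list with an
-- inner tree-walk by index (no lst[1:] copies); equivalence is about the RETURN value (both
-- Pythons also mutate a caller-supplied tree dict in the same way).

-- ===== PORT A =====
-- fuel bound for A's recursion (a termination guard only; proved sufficient under Pre_)
def pvG : Nat → Nat → Nat
  | 0, _ => 1
  | n + 1, s => s + 2 + pvG n (s + 1)

-- literal transliteration of A's recursive body; fuel-out returns the current tree (unreachable under Pre_)
def pvAuxA : Nat → List Int → Option (PySem.Dict Int Int) → Int → Option (PySem.Dict Int Int)
  | 0, _, tree, _ => tree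
  | f + 1, lst, tree, idx =>
    let tree := if lst.length > 0 ∧ tree = none
                then some ((PySem.Dict.empty).insert 0 (lst.headD 0)) else tree
    match lst with
    | [] => tree
    | v :: rest =>
      match tree with
      | none => none  -- unreachable: lst ≠ [] forces tree ≠ none after the init line
      | some d =>
        match d.get? idx with
        | some w =>
          if v < w then pvAuxA f (v :: rest) (some d) (idx * 2 + 1)
          else if v > w then pvAuxA f (v :: rest) (some d) (idx * 2 + 2)
          else pvAuxA f rest (some d) 0
        | none => pvAuxA f rest (some (d.insert idx v)) 0

def create_sorted_binary_tree (lst : List Int) (tree : Option (List (Int × Int))) (idx : Int) : Option (List (Int × Int)) :=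
  let d0 : PySem.Dict Int Int :=
    match tree with
    | none => (PySem.Dict.empty).insert 0 (lst.headD 0)
    | some l => PySem.Dict.mk l
  (pvAuxA (d0.size + pvG lst.length d0.size) lst (tree.map PySem.Dict.mk) idx).map (·.items)

-- ===== PORT B =====
-- Source B's inner `while True` walk; fuel d.size + 1 is a termination guard only (under Pre_ the
-- walk visits strictly monotone stored keys, so it exits within d.size + 1 steps)
def pvWalkB : Nat → PySem.Dict Int Int → Int → Int → PySem.Dict Int Int
  | 0, d, _, _ => d
  | f + 1, d, i, v =>
    match d.get? i with
    | none => d.insert i v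
    | some w =>
      if v < w then pvWalkB f d (i * 2 + 1) v
      else if v > w then pvWalkB f d (i * 2 + 2) v
      else d

-- Source B's `for v in lst` loop with the `start` variable
def pvLoopB : List Int → PySem.Dict Int Int → Int → PySem.Dict Int Int
  | [], d, _ => d
  | v :: rest, d, start => pvLoopB rest (pvWalkB (d.size + 1) d start v) 0

def create_sorted_binary_tree_alt (lst : List Int) (tree : Option (List (Int × Int))) (idx : Int) : Option (List (Int × Int)) :=
  match lst with
  | [] => tree
  | v :: _ =>
    let d : PySem.Dict Int Int :=
      match tree with
      | none => (PySem.Dict.empty).insert 0 v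
      | some l => PySem.Dict.mk l
    some ((pvLoopB lst d idx).items)

-- ===== PRECONDITION & SPEC =====
-- the walk never re-enters an index it already visited, except at the fixed points of the child
-- step i*2+1 / i*2+2: only a start index of -1 or -2 that is already a stored key can make A
-- recurse forever (RecursionError); B's while-loop spins forever on exactly the same inputs.
-- pvSafe d i: start index i cannot sit on a fixed point of the walk over dict d
def pvSafe (d : PySem.Dict Int Int) (i : Int) : Prop := 0 ≤ i ∨ i ≤ -3 ∨ d.get? i = none

-- Pre_ excludes only start indices -1 / -2 that are already stored keys of the effective initial
-- dict: there A can recurse forever (and does on some of them, e.g. ([0], {-1: 5}, -1) raises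
-- RecursionError) and B's walk loops forever too; on a few of the excluded inputs A does return
-- (see the cite) — whether the walk escapes the fixed point there depends on the stored value.
def Pre_create_sorted_binary_tree (lst : List Int) (tree : Option (List (Int × Int))) (idx : Int) : Prop :=
  lst = [] ∨ pvSafe (PySem.Dict.mk (tree.getD [(0, lst.headD 0)])) idx
instance (lst : List Int) (tree : Option (List (Int × Int))) (idx : Int) : Decidable (Pre_create_sorted_binary_tree lst tree idx) := by unfold Pre_create_sorted_binary_tree pvSafe; infer_instance

def pvWitness_create_sorted_binary_tree : List Int × (Option (List (Int × Int))) × Int := ([3, 1, 2, 1], none, 0)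

def Spec_create_sorted_binary_tree (lst : List Int) (tree : Option (List (Int × Int))) (idx : Int) (out : Option (List (Int × Int))) : Prop := out = create_sorted_binary_tree_alt lst tree idx
instance (lst : List Int) (tree : Option (List (Int × Int))) (idx : Int) (out : Option (List (Int × Int))) : Decidable (Spec_create_sorted_binary_tree lst tree idx out) := by unfold Spec_create_sorted_binary_tree; infer_instance

-- ===== CLAIM (what is proved, stated in full; the proofs are below) =====
def Claim_equal_create_sorted_binary_tree : Prop := ∀ (lst : List Int) (tree : Option (List (Int × Int))) (idx : Int), Dom_create_sorted_binary_tree lst tree idx → Pre_create_sorted_binary_tree lst tree idx → Spec_create_sorted_binary_tree lst tree idx (create_sorted_binary_tree lst tree idx)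

-- ===== LEMMAS AND PROOFS =====

-- measure of the walk at index i: number of stored keys ≥ i (nonnegative phase, indices only
-- grow) resp. ≤ i (the phase i ≤ -3, indices only shrink)
def pvMu (d : PySem.Dict Int Int) (i : Int) : Nat :=
  if 0 ≤ i then (d.items.filter (fun kv => decide (i ≤ kv.1))).length
  else (d.items.filter (fun kv => decide (kv.1 ≤ i))).length

lemma pvMu_le_size (d : PySem.Dict Int Int) (i : Int) : pvMu d i ≤ d.size := by
  unfold pvMu
  split_ifs <;> simpa [PySem.Dict.size] using List.length_filter_le _ d.items

lemma pvG_mono (n : Nat) : ∀ {s t : Nat}, s ≤ t → pvG n s ≤ pvG n t := by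
  induction n with
  | zero => intro s t _; simp [pvG]
  | succ n ih => intro s t h; simp only [pvG]; have := ih (show s + 1 ≤ t + 1 by omega); omega

lemma pvG_pos (n s : Nat) : 1 ≤ pvG n s := by
  cases n <;> simp [pvG] <;> omega

-- generic counting facts behind the measure: moving to a strictly larger (resp. smaller) index
-- strictly shrinks the set of stored keys ≥ (resp. ≤) the index, if the current index is stored
lemma pv_filter_lt (l : List (Int × Int)) {i j w : Int}
    (hij : i < j) (hmem : (i, w) ∈ l) :
    (l.filter (fun kv => decide (j ≤ kv.1))).length <
    (l.filter (fun kv => decide (i ≤ kv.1))).length := by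
  obtain ⟨l₁, l₂, rfl⟩ := List.append_of_mem hmem
  have h1 : l₁.countP (fun kv => decide (j ≤ kv.1)) ≤ l₁.countP (fun kv => decide (i ≤ kv.1)) :=
    List.countP_mono_left (by intro x _ hx; simp only [decide_eq_true_eq] at hx ⊢; omega)
  have h2 : l₂.countP (fun kv => decide (j ≤ kv.1)) ≤ l₂.countP (fun kv => decide (i ≤ kv.1)) :=
    List.countP_mono_left (by intro x _ hx; simp only [decide_eq_true_eq] at hx ⊢; omega)
  simp only [← List.countP_eq_length_filter, List.countP_append, List.countP_cons]
  simp only [decide_eq_true_eq]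
  have hji : ¬ (j ≤ i) := by omega
  simp [hji]
  omega

lemma pv_filter_lt' (l : List (Int × Int)) {i j w : Int}
    (hij : j < i) (hmem : (i, w) ∈ l) :
    (l.filter (fun kv => decide (kv.1 ≤ j))).length <
    (l.filter (fun kv => decide (kv.1 ≤ i))).length := by
  obtain ⟨l₁, l₂, rfl⟩ := List.append_of_mem hmem
  have h1 : l₁.countP (fun kv => decide (kv.1 ≤ j)) ≤ l₁.countP (fun kv => decide (kv.1 ≤ i)) :=
    List.countP_mono_left (by intro x _ hx; simp only [decide_eq_true_eq] at hx ⊢; omega)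
  have h2 : l₂.countP (fun kv => decide (kv.1 ≤ j)) ≤ l₂.countP (fun kv => decide (kv.1 ≤ i)) :=
    List.countP_mono_left (by intro x _ hx; simp only [decide_eq_true_eq] at hx ⊢; omega)
  simp only [← List.countP_eq_length_filter, List.countP_append, List.countP_cons]
  simp only [decide_eq_true_eq]
  have hji : ¬ (i ≤ j) := by omega
  simp [hji]
  omega

lemma pvMu_pos {d : PySem.Dict Int Int} {i w : Int} (hget : d.get? i = some w) :
    1 ≤ pvMu d i := by
  have hmem : (i, w) ∈ d.items := PySem.Dict.mem_items_of_get?_eq_some _ hget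
  unfold pvMu
  split_ifs with h0
  · have : (i, w) ∈ d.items.filter (fun kv => decide (i ≤ kv.1)) := by
      simp [List.mem_filter, hmem]
    exact List.length_pos_of_mem this
  · have : (i, w) ∈ d.items.filter (fun kv => decide (kv.1 ≤ i)) := by
      simp [List.mem_filter, hmem]
    exact List.length_pos_of_mem this

-- one descend step of the walk: the successor index is safe again and the measure drops
lemma pvStep {d : PySem.Dict Int Int} {i w : Int} (hget : d.get? i = some w)
    (hsafe : pvSafe d i) {k : Int} (hk : k = i * 2 + 1 ∨ k = i * 2 + 2) :
    pvSafe d k ∧ pvMu d k < pvMu d i := by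
  have hmem : (i, w) ∈ d.items := PySem.Dict.mem_items_of_get?_eq_some _ hget
  rcases hsafe with h0 | h3 | hn
  · have hik : i < k := by omega
    have hk0 : 0 ≤ k := by omega
    refine ⟨Or.inl hk0, ?_⟩
    unfold pvMu
    rw [if_pos h0, if_pos hk0]
    exact pv_filter_lt d.items hik hmem
  · have hki : k < i := by omega
    have hk3 : k ≤ -3 := by omega
    refine ⟨Or.inr (Or.inl hk3), ?_⟩
    unfold pvMu
    rw [if_neg (by omega), if_neg (by omega)]
    exact pv_filter_lt' d.items hki hmem
  · rw [hn] at hget; exact absurd hget (by simp)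

-- B's walk ignores the exact fuel once the fuel exceeds the measure
lemma pvWalkB_fuel_congr (c : Nat) : ∀ (d : PySem.Dict Int Int) (i v : Int) (f g : Nat),
    pvSafe d i → pvMu d i ≤ c → c < f → c < g → pvWalkB f d i v = pvWalkB g d i v := by
  induction c with
  | zero =>
    intro d i v f g hs hc hf hg
    obtain ⟨f', rfl⟩ := Nat.exists_eq_succ_of_ne_zero (by omega : f ≠ 0)
    obtain ⟨g', rfl⟩ := Nat.exists_eq_succ_of_ne_zero (by omega : g ≠ 0)
    cases hget : d.get? i with
    | none => simp [pvWalkB, hget]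
    | some w => exact absurd (pvMu_pos hget) (by omega)
  | succ c ih =>
    intro d i v f g hs hc hf hg
    obtain ⟨f', rfl⟩ := Nat.exists_eq_succ_of_ne_zero (by omega : f ≠ 0)
    obtain ⟨g', rfl⟩ := Nat.exists_eq_succ_of_ne_zero (by omega : g ≠ 0)
    cases hget : d.get? i with
    | none => simp [pvWalkB, hget]
    | some w =>
      simp only [pvWalkB, hget]
      split_ifs with h1 h2
      · obtain ⟨hs', hlt⟩ := pvStep hget hs (Or.inl rfl)
        exact ih d (i * 2 + 1) v f' g' hs' (by omega) (by omega) (by omega)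
      · obtain ⟨hs', hlt⟩ := pvStep hget hs (Or.inr rfl)
        exact ih d (i * 2 + 2) v f' g' hs' (by omega) (by omega) (by omega)
      · rfl

lemma pv_size_insert_fresh {d : PySem.Dict Int Int} {i v : Int} (hget : d.get? i = none) :
    (d.insert i v).size = d.size + 1 := by
  have hc : d.contains i = false := by
    rw [PySem.Dict.contains_eq_isSome_get?, hget]; rfl
  simp [PySem.Dict.size, PySem.Dict.items_insert, hc]

-- main lemma: with sufficient fuel, A's recursion computes B's loop result
lemma pv_main (n : Nat) : ∀ (c : Nat) (lst : List Int) (d : PySem.Dict Int Int) (idx : Int) (fuel : Nat),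
    lst.length = n → pvMu d idx ≤ c → pvSafe d idx → pvMu d idx + pvG n d.size ≤ fuel →
    pvAuxA fuel lst (some d) idx = some (pvLoopB lst d idx) := by
  induction n with
  | zero =>
    intro c lst d idx fuel hlen hc hs hf
    have hnil : lst = [] := List.eq_nil_of_length_eq_zero hlen
    subst hnil
    obtain ⟨f', rfl⟩ := Nat.exists_eq_succ_of_ne_zero
      (by have := pvG_pos 0 d.size; omega : fuel ≠ 0)
    simp [pvAuxA, pvLoopB]
  | succ n ihn =>
    intro c
    induction c with
    | zero =>
      intro lst d idx fuel hlen hc hs hf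
      obtain ⟨v, rest, rfl⟩ : ∃ v rest, lst = v :: rest := by
        cases lst with
        | nil => simp at hlen
        | cons a b => exact ⟨a, b, rfl⟩
      obtain ⟨f', rfl⟩ := Nat.exists_eq_succ_of_ne_zero
        (by have := pvG_pos (n + 1) d.size; omega : fuel ≠ 0)
      cases hget : d.get? idx with
      | some w => exact absurd (pvMu_pos hget) (by omega)
      | none =>
        simp only [pvAuxA, List.length_cons, pvLoopB]
        rw [if_neg (by simp)]
        simp only [hget]
        have hw : pvWalkB (d.size + 1) d idx v = d.insert idx v := by
          simp [pvWalkB, hget]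
        rw [hw]
        have hsz := pv_size_insert_fresh (v := v) hget
        apply ihn (pvMu (d.insert idx v) 0) rest _ 0 f'
          (by simpa using hlen) le_rfl (Or.inl le_rfl)
        have h1 : pvMu (d.insert idx v) 0 ≤ d.size + 1 := by
          have := pvMu_le_size (d.insert idx v) 0; omega
        simp only [pvG] at hf
        rw [hsz]; omega
    | succ c ihc =>
      intro lst d idx fuel hlen hc hs hf
      obtain ⟨v, rest, rfl⟩ : ∃ v rest, lst = v :: rest := by
        cases lst with
        | nil => simp at hlen
        | cons a b => exact ⟨a, b, rfl⟩
      obtain ⟨f', rfl⟩ := Nat.exists_eq_succ_of_ne_zero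
        (by have := pvG_pos (n + 1) d.size; omega : fuel ≠ 0)
      cases hget : d.get? idx with
      | none =>
        simp only [pvAuxA, List.length_cons, pvLoopB]
        rw [if_neg (by simp)]
        simp only [hget]
        have hw : pvWalkB (d.size + 1) d idx v = d.insert idx v := by
          simp [pvWalkB, hget]
        rw [hw]
        have hsz := pv_size_insert_fresh (v := v) hget
        apply ihn (pvMu (d.insert idx v) 0) rest _ 0 f'
          (by simpa using hlen) le_rfl (Or.inl le_rfl)
        have h1 : pvMu (d.insert idx v) 0 ≤ d.size + 1 := by
          have := pvMu_le_size (d.insert idx v) 0; omega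
        simp only [pvG] at hf
        rw [hsz]; omega
      | some w =>
        have hpos := pvMu_pos hget
        have hle := pvMu_le_size d idx
        simp only [pvAuxA, List.length_cons]
        rw [if_neg (by simp)]
        simp only [hget]
        split_ifs with h1 h2
        · -- v < w : descend left
          obtain ⟨hs', hlt⟩ := pvStep hget hs (Or.inl rfl)
          have key := ihc (v :: rest) d (idx * 2 + 1) f' hlen (by omega) hs' (by omega)
          rw [key]
          have hwalk : pvWalkB (d.size + 1) d idx v = pvWalkB (d.size + 1) d (idx * 2 + 1) v := by
            simp only [pvWalkB, hget]
            rw [if_pos h1]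
            exact pvWalkB_fuel_congr (pvMu d (idx * 2 + 1)) d (idx * 2 + 1) v d.size (d.size + 1)
              hs' le_rfl (by omega) (by omega)
          simp only [pvLoopB, hwalk]
        · -- v > w : descend right
          obtain ⟨hs', hlt⟩ := pvStep hget hs (Or.inr rfl)
          have key := ihc (v :: rest) d (idx * 2 + 2) f' hlen (by omega) hs' (by omega)
          rw [key]
          have hwalk : pvWalkB (d.size + 1) d idx v = pvWalkB (d.size + 1) d (idx * 2 + 2) v := by
            simp only [pvWalkB, hget]
            rw [if_neg h1, if_pos h2]
            exact pvWalkB_fuel_congr (pvMu d (idx * 2 + 2)) d (idx * 2 + 2) v d.size (d.size + 1)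
              hs' le_rfl (by omega) (by omega)
          simp only [pvLoopB, hwalk]
        · -- v = w : duplicate is dropped
          have hw : pvWalkB (d.size + 1) d idx v = d := by
            simp only [pvWalkB, hget]
            rw [if_neg h1, if_neg h2]
          simp only [pvLoopB, hw]
          apply ihn (pvMu d 0) rest d 0 f' (by simpa using hlen) le_rfl (Or.inl le_rfl)
          have h3 : pvMu d 0 ≤ d.size := pvMu_le_size d 0
          have h4 : pvG n d.size ≤ pvG n (d.size + 1) := pvG_mono n (by omega)
          simp only [pvG] at hf
          omega

-- with tree = None and a nonempty list, A's first call just initialises the dict in place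
lemma pvAuxA_init (f : Nat) (v : Int) (rest : List Int) (idx : Int) :
    pvAuxA (f + 1) (v :: rest) none idx =
    pvAuxA (f + 1) (v :: rest) (some ((PySem.Dict.empty).insert 0 v)) idx := by
  simp [pvAuxA]

-- the init dict {0: v} as a literal
lemma pv_init_dict (v : Int) :
    (PySem.Dict.empty : PySem.Dict Int Int).insert 0 v = PySem.Dict.mk [(0, v)] := by
  apply PySem.Dict.ext
  rw [PySem.Dict.items_insert]
  simp [PySem.Dict.empty]

-- ===== VERDICT (by name: the statement is the Claim_ definition above) =====
theorem create_sorted_binary_tree_spec : Claim_equal_create_sorted_binary_tree := by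
  unfold Claim_equal_create_sorted_binary_tree
  intro lst tree idx _ hpre
  unfold Spec_create_sorted_binary_tree
  unfold Pre_create_sorted_binary_tree at hpre
  cases lst with
  | nil =>
    cases tree with
    | none => rfl
    | some l =>
      simp only [create_sorted_binary_tree, create_sorted_binary_tree_alt, Option.map_some,
        List.length_nil]
      obtain ⟨f', hf⟩ : ∃ f',
          (PySem.Dict.mk l).size + pvG 0 (PySem.Dict.mk l).size = f' + 1 :=
        ⟨(PySem.Dict.mk l).size + pvG 0 (PySem.Dict.mk l).size - 1,
          by have := pvG_pos 0 (PySem.Dict.mk l).size; omega⟩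
      rw [hf]
      simp [pvAuxA]
  | cons v rest =>
    have hsafe : pvSafe (PySem.Dict.mk (tree.getD [(0, v)])) idx := by
      rcases hpre with h | h
      · exact absurd h (by simp)
      · simpa using h
    cases tree with
    | none =>
      simp only [Option.getD_none] at hsafe
      rw [← pv_init_dict] at hsafe
      simp only [create_sorted_binary_tree, create_sorted_binary_tree_alt, Option.map_none,
        List.headD_cons]
      obtain ⟨f', hf⟩ : ∃ f',
          ((PySem.Dict.empty : PySem.Dict Int Int).insert 0 v).size +
            pvG (v :: rest).length ((PySem.Dict.empty : PySem.Dict Int Int).insert 0 v).size = f' + 1 :=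
        ⟨((PySem.Dict.empty : PySem.Dict Int Int).insert 0 v).size +
            pvG (v :: rest).length ((PySem.Dict.empty : PySem.Dict Int Int).insert 0 v).size - 1,
          by have := pvG_pos (v :: rest).length ((PySem.Dict.empty : PySem.Dict Int Int).insert 0 v).size; omega⟩
      rw [hf, pvAuxA_init, ← hf]
      rw [pv_main (v :: rest).length (pvMu ((PySem.Dict.empty : PySem.Dict Int Int).insert 0 v) idx)
        (v :: rest) _ idx _ rfl le_rfl hsafe
        (by have := pvMu_le_size ((PySem.Dict.empty : PySem.Dict Int Int).insert 0 v) idx; omega)]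
      rfl
    | some l =>
      simp only [Option.getD_some] at hsafe
      simp only [create_sorted_binary_tree, create_sorted_binary_tree_alt, Option.map_some]
      rw [pv_main (v :: rest).length (pvMu (PySem.Dict.mk l) idx)
        (v :: rest) (PySem.Dict.mk l) idx _ rfl le_rfl hsafe
        (by have := pvMu_le_size (PySem.Dict.mk l) idx; omega)]
      rfl
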